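-- pv_equiv track=rewrite | github.com/InstituteforDiseaseModeling/EMOD | Regression/shared_embedded_py_scripts/dtk_test/dtk_sft.py | collapse_to_at_least_min
-- ===== SOURCE A (Python) =====
-- def collapse_to_at_least_min(observed, expected, min_expected=5):
--     """
--     Iterates through expected and observed results, combine bins in the expected array that are less than min_expected
--       to their neighbours until their sum is 5 or more. Combine the corresponding bins in the observed array as well.
--     :param observed: an array of observed occurrence of each unique usage duration expiration time step in the
--      simulation, with the time steps sorted in increasing ordered
--     :param expected: an array of expected occurrence of each unique usage duration expiration time step in the
--      simulation, with the time steps sorted in increasing ordered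
--     :return:
--     """
--     expected_at_least_min = []
--     observed_at_least_min = []
--     i = 0
--     while i < len(expected):
--         tmp_e = expected[i]
--         tmp_o = observed[i]
--         while tmp_e < min_expected and i < len(expected) - 1:
--             i = i + 1
--             tmp_e = tmp_e + expected[i]
--             tmp_o = tmp_o + observed[i]
--         expected_at_least_min.append(tmp_e)
--         observed_at_least_min.append(tmp_o)
--         i = i + 1
--     return observed_at_least_min, expected_at_least_min
-- ===== SOURCE B (Python) =====
-- def collapse_to_at_least_min(observed, expected, min_expected=5):
--     observed_at_least_min = []
--     expected_at_least_min = []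
--     cur_o = 0
--     cur_e = 0
--     group_open = False
--     for j in range(len(expected)):
--         cur_e += expected[j]
--         cur_o += observed[j]
--         group_open = True
--         if cur_e >= min_expected:
--             observed_at_least_min.append(cur_o)
--             expected_at_least_min.append(cur_e)
--             cur_o = 0
--             cur_e = 0
--             group_open = False
--     if group_open:
--         observed_at_least_min.append(cur_o)
--         expected_at_least_min.append(cur_e)
--     return observed_at_least_min, expected_at_least_min
-- ===== Notes on version B (the rewrite author's own statement) =====
-- stated objective: simpler
-- what changed: Replaced A's nested while loops with index juggling by a single flat pass over the indices that carries running sums and an open-group flag, flushing a group whenever the expected sum reaches the threshold and emitting the open leftover after the loop.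
import Mathlib
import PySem

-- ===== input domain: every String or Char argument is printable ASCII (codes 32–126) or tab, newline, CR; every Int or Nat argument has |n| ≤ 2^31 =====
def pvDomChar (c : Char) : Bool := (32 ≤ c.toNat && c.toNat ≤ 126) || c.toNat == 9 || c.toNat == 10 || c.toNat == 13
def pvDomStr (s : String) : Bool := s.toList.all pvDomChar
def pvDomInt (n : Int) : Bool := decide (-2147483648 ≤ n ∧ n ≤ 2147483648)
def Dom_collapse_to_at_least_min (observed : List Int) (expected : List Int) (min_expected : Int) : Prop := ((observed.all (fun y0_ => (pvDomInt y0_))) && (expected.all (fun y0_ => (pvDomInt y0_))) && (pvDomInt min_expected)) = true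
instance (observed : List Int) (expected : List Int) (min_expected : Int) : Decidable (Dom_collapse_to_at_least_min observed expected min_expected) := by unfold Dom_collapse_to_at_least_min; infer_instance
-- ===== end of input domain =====

-- B replaces A's nested while loops by one flat indexed loop carrying running sums and an
-- open-group flag (objective: simpler decomposition, same cost).
-- ===== PORT A =====
-- inner 'while tmp_e < min_expected and i < len(expected) - 1' loop of A.
-- The fuel argument only makes the loop total; with fuel ≥ len(expected) - 1 - i (always the
-- case at the call site) it never runs out before the loop condition fails.
def pvInnerA (observed : List Int) (expected : List Int) (min_expected : Int) :
    Nat → Nat → Int → Int → Nat × Int × Int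
  | 0, i, tmp_e, tmp_o => (i, tmp_e, tmp_o)
  | fuel + 1, i, tmp_e, tmp_o =>
    if tmp_e < min_expected ∧ i < expected.length - 1 then
      pvInnerA observed expected min_expected fuel (i + 1)
        (tmp_e + PySem.List.pyGetD expected ((i + 1 : Nat) : Int) 0)
        (tmp_o + PySem.List.pyGetD observed ((i + 1 : Nat) : Int) 0)
    else (i, tmp_e, tmp_o)

-- outer 'while i < len(expected)' loop of A (fuel, likewise, only makes it total)
def pvOuterA (observed : List Int) (expected : List Int) (min_expected : Int) :
    Nat → Nat → List Int → List Int → List Int × List Int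
  | 0, _, accO, accE => (accO, accE)
  | fuel + 1, i, accO, accE =>
    if i < expected.length then
      let r := pvInnerA observed expected min_expected expected.length i
        (PySem.List.pyGetD expected ((i : Nat) : Int) 0)
        (PySem.List.pyGetD observed ((i : Nat) : Int) 0)
      pvOuterA observed expected min_expected fuel (r.1 + 1) (accO ++ [r.2.2]) (accE ++ [r.2.1])
    else (accO, accE)

def collapse_to_at_least_min (observed : List Int) (expected : List Int) (min_expected : Int) : List Int × List Int :=
  pvOuterA observed expected min_expected (expected.length + 1) 0 [] []

-- ===== PORT B =====
-- one loop-body step of B: add bin j into the running sums, flush when the threshold is reached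
def pvStepB (observed : List Int) (expected : List Int) (min_expected : Int)
    (st : List Int × List Int × Int × Int × Bool) (j : Nat) :
    List Int × List Int × Int × Int × Bool :=
  let cur_e := st.2.2.2.1 + PySem.List.pyGetD expected ((j : Nat) : Int) 0
  let cur_o := st.2.2.1 + PySem.List.pyGetD observed ((j : Nat) : Int) 0
  if min_expected ≤ cur_e then (st.1 ++ [cur_o], st.2.1 ++ [cur_e], 0, 0, false)
  else (st.1, st.2.1, cur_o, cur_e, true)

-- B's trailing 'if group_open: append the leftover sums'
def pvFinishB (st : List Int × List Int × Int × Int × Bool) : List Int × List Int :=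
  if st.2.2.2.2 then (st.1 ++ [st.2.2.1], st.2.1 ++ [st.2.2.2.1]) else (st.1, st.2.1)

def collapse_to_at_least_min_alt (observed : List Int) (expected : List Int) (min_expected : Int) : List Int × List Int :=
  pvFinishB ((List.range expected.length).foldl (pvStepB observed expected min_expected) ([], [], 0, 0, false))

-- ===== PRECONDITION & SPEC =====
-- Pre_ excludes exactly the inputs where the Python A raises IndexError: observed shorter than expected.
def Pre_collapse_to_at_least_min (observed : List Int) (expected : List Int) (min_expected : Int) : Prop :=
  expected.length ≤ observed.length
instance (observed : List Int) (expected : List Int) (min_expected : Int) : Decidable (Pre_collapse_to_at_least_min observed expected min_expected) := by unfold Pre_collapse_to_at_least_min; infer_instance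
def pvWitness_collapse_to_at_least_min : List Int × List Int × Int := ([1, 2, 3], [1, 4, 7], 5)

def Spec_collapse_to_at_least_min (observed : List Int) (expected : List Int) (min_expected : Int) (out : List Int × List Int) : Prop := out = collapse_to_at_least_min_alt observed expected min_expected
instance (observed : List Int) (expected : List Int) (min_expected : Int) (out : List Int × List Int) : Decidable (Spec_collapse_to_at_least_min observed expected min_expected out) := by unfold Spec_collapse_to_at_least_min; infer_instance

-- ===== CLAIM (what is proved, stated in full; the proofs are below) =====
def Claim_equal_collapse_to_at_least_min : Prop := ∀ (observed : List Int) (expected : List Int) (min_expected : Int), Dom_collapse_to_at_least_min observed expected min_expected → Pre_collapse_to_at_least_min observed expected min_expected → Spec_collapse_to_at_least_min observed expected min_expected (collapse_to_at_least_min observed expected min_expected)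

-- ===== LEMMAS AND PROOFS =====

-- the state B's step leaves right after processing a bin whose running sums are tmp_e/tmp_o
def pvChk (min_expected : Int) (tmp_e tmp_o : Int) (aO aE : List Int) :
    List Int × List Int × Int × Int × Bool :=
  if min_expected ≤ tmp_e then (aO ++ [tmp_o], aE ++ [tmp_e], 0, 0, false)
  else (aO, aE, tmp_o, tmp_e, true)

theorem pvInnerA_ge (observed expected : List Int) (min_expected : Int) :
    ∀ (fuel i : Nat) (tmp_e tmp_o : Int),
    i ≤ (pvInnerA observed expected min_expected fuel i tmp_e tmp_o).1 := by
  intro fuel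
  induction fuel with
  | zero => intro i te tmpo; simp [pvInnerA]
  | succ f ih =>
    intro i te tmpo
    rw [pvInnerA]
    split
    · exact le_trans (Nat.le_succ i) (ih (i + 1) _ _)
    · simp

theorem pvInnerA_lt (observed expected : List Int) (min_expected : Int) :
    ∀ (fuel i : Nat) (tmp_e tmp_o : Int), i < expected.length →
    (pvInnerA observed expected min_expected fuel i tmp_e tmp_o).1 < expected.length := by
  intro fuel
  induction fuel with
  | zero => intro i te tmpo h; simpa [pvInnerA] using h
  | succ f ih =>
    intro i te tmpo h
    rw [pvInnerA]
    split
    · exact ih (i + 1) _ _ (by omega)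
    · simpa using h

theorem pvStepB_chk (observed expected : List Int) (min_expected : Int)
    (aO aE : List Int) (cO cE : Int) (b : Bool) (j : Nat) :
    pvStepB observed expected min_expected (aO, aE, cO, cE, b) j
      = pvChk min_expected (cE + PySem.List.pyGetD expected ((j : Nat) : Int) 0)
          (cO + PySem.List.pyGetD observed ((j : Nat) : Int) 0) aO aE := by
  simp [pvStepB, pvChk]

theorem pvL (observed expected : List Int) (min_expected : Int) :
    ∀ (fuel i : Nat) (tmp_e tmp_o : Int) (aO aE : List Int),
    i < expected.length → expected.length - 1 - i ≤ fuel →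
    pvFinishB ((List.range' (i + 1) (expected.length - (i + 1))).foldl
        (pvStepB observed expected min_expected)
        (pvChk min_expected tmp_e tmp_o aO aE))
      = (let r := pvInnerA observed expected min_expected fuel i tmp_e tmp_o
         pvFinishB ((List.range' (r.1 + 1) (expected.length - (r.1 + 1))).foldl
            (pvStepB observed expected min_expected)
            (aO ++ [r.2.2], aE ++ [r.2.1], 0, 0, false))) := by
  intro fuel
  induction fuel with
  | zero =>
    intro i tmp_e tmp_o aO aE hi hf
    simp only [pvInnerA]
    have hz : expected.length - (i + 1) = 0 := by omega
    rw [hz]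
    by_cases hm : min_expected ≤ tmp_e
    · simp [pvChk, hm, List.range', pvFinishB]
    · simp [pvChk, hm, List.range', pvFinishB]
  | succ f ih =>
    intro i tmp_e tmp_o aO aE hi hf
    rw [pvInnerA]
    by_cases hc : tmp_e < min_expected ∧ i < expected.length - 1
    · -- group stays open: both sides absorb bin i+1
      rw [if_pos hc]
      have hrange : List.range' (i + 1) (expected.length - (i + 1))
          = (i + 1) :: List.range' (i + 2) (expected.length - (i + 2)) := by
        rw [show expected.length - (i + 1) = (expected.length - (i + 2)) + 1 by omega,
          List.range'_succ]
      rw [hrange]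
      simp only [List.foldl_cons, pvChk, if_neg (by omega : ¬ min_expected ≤ tmp_e), pvStepB_chk]
      exact ih (i + 1)
        (tmp_e + PySem.List.pyGetD expected ((i + 1 : Nat) : Int) 0)
        (tmp_o + PySem.List.pyGetD observed ((i + 1 : Nat) : Int) 0) aO aE (by omega) (by omega)
    · -- inner loop exits here
      rw [if_neg hc]
      simp only []
      by_cases hm : min_expected ≤ tmp_e
      · simp only [pvChk, if_pos hm]
      · -- tmp_e < min_expected, so i = len - 1: both folds are over the empty range
        have hz : expected.length - (i + 1) = 0 := by omega
        rw [hz]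
        simp [pvChk, hm, List.range', pvFinishB]

theorem pvM (observed expected : List Int) (min_expected : Int) :
    ∀ (fuel i : Nat) (aO aE : List Int), i ≤ expected.length → expected.length - i < fuel →
    pvOuterA observed expected min_expected fuel i aO aE
      = pvFinishB ((List.range' i (expected.length - i)).foldl
          (pvStepB observed expected min_expected) (aO, aE, 0, 0, false)) := by
  intro fuel
  induction fuel with
  | zero => intro i aO aE hi hf; omega
  | succ f ih =>
    intro i aO aE hi hf
    by_cases h : i < expected.length
    · rw [pvOuterA, if_pos h]
      have hrange : List.range' i (expected.length - i)
          = i :: List.range' (i + 1) (expected.length - (i + 1)) := by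
        rw [show expected.length - i = (expected.length - (i + 1)) + 1 by omega,
          List.range'_succ]
      rw [hrange]
      simp only [List.foldl_cons, pvStepB_chk, Int.zero_add]
      rw [pvL observed expected min_expected expected.length i _ _ aO aE h (by omega)]
      simp only []
      set r := pvInnerA observed expected min_expected expected.length i
        (PySem.List.pyGetD expected ((i : Nat) : Int) 0)
        (PySem.List.pyGetD observed ((i : Nat) : Int) 0) with hr
      have h1 : i ≤ r.1 := pvInnerA_ge _ _ _ _ _ _ _
      have h2 : r.1 < expected.length := pvInnerA_lt _ _ _ _ _ _ _ h
      rw [ih (r.1 + 1) (aO ++ [r.2.2]) (aE ++ [r.2.1]) (by omega) (by omega)]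
    · have : i = expected.length := by omega
      subst this
      rw [pvOuterA, if_neg (by omega)]
      simp [pvFinishB]

-- ===== VERDICT (by name: the statement is the Claim_ definition above) =====
theorem collapse_to_at_least_min_spec : Claim_equal_collapse_to_at_least_min := by
  intro observed expected min_expected _ _
  unfold Spec_collapse_to_at_least_min collapse_to_at_least_min collapse_to_at_least_min_alt
  rw [pvM observed expected min_expected (expected.length + 1) 0 [] [] (by omega) (by omega)]
  rw [List.range_eq_range']
  simp
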